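-- pv_equiv track=rewrite | github.com/nickbarton-wiq/advent_of_code | 2024/07/part1.py | generate_all_operator_combinations
-- ===== SOURCE A (Python) =====
-- def generate_all_operator_combinations(n: int) -> list:
--     if n <= 1:
--         return [[]]
--     combinations = []
--     for operators in generate_all_operator_combinations(n-1):
--         combinations.append(operators + ['+'])
--         combinations.append(operators + ['*'])
--     return combinations
-- ===== SOURCE B (Python) =====
-- import itertools
--
-- def generate_all_operator_combinations(n: int) -> list:
--     if n <= 1:
--         return [[]]
--     return [list(p) for p in itertools.product(['+', '*'], repeat=n - 1)]
-- ===== Notes on version B (the rewrite author's own statement) =====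
-- stated objective: idiomatic
-- what changed: Replaced the recursive build-and-append loop by a single itertools.product(['+','*'], repeat=n-1) enumeration (same lexicographic order, '+' before '*').
import Mathlib
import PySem

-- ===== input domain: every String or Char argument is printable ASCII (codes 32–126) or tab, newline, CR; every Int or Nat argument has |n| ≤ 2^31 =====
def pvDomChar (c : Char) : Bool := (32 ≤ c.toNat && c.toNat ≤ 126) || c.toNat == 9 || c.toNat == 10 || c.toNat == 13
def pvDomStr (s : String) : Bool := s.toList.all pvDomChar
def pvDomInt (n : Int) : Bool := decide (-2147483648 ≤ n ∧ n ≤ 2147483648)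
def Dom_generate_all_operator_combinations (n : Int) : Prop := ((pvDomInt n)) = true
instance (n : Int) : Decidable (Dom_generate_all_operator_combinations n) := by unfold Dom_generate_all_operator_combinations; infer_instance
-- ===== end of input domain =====

-- ===== PORT A =====
-- A: structural recursion appending ops+['+'] then ops+['*'] for each shorter combination.
def generate_all_operator_combinations (n : Int) : List (List String) :=
  if n ≤ 1 then [[]]
  else
    (generate_all_operator_combinations (n - 1)).foldl
      (fun combinations operators =>
        (combinations ++ [operators ++ ["+"]]) ++ [operators ++ ["*"]]) []
termination_by n.toNat
decreasing_by omega

-- ===== PORT B =====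
-- B: itertools.product(['+','*'], repeat=n-1), ported as its documented fold
-- (result = [[]]; for each of the n-1 positions, extend every tuple with each pool element).
def pvProductStep (acc : List (List String)) : List (List String) :=
  acc.flatMap (fun c => ["+", "*"].map (fun op => c ++ [op]))

def generate_all_operator_combinations_alt (n : Int) : List (List String) :=
  if n ≤ 1 then [[]]
  else (List.range (n - 1).toNat).foldl (fun acc _ => pvProductStep acc) [[]]

-- ===== PRECONDITION & SPEC =====
-- Pre_ excludes exactly the inputs on which Python A raises: A recurses to depth n-1
-- before building anything, so for n ≥ 1000 CPython raises RecursionError (default limit).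
def Pre_generate_all_operator_combinations (n : Int) : Prop := n ≤ 999
instance (n : Int) : Decidable (Pre_generate_all_operator_combinations n) := by unfold Pre_generate_all_operator_combinations; infer_instance
def pvWitness_generate_all_operator_combinations : Int := (3)
def Spec_generate_all_operator_combinations (n : Int) (out : List (List String)) : Prop := out = generate_all_operator_combinations_alt n
instance (n : Int) (out : List (List String)) : Decidable (Spec_generate_all_operator_combinations n out) := by unfold Spec_generate_all_operator_combinations; infer_instance

-- ===== CLAIM (what is proved, stated in full; the proofs are below) =====
def Claim_equal_generate_all_operator_combinations : Prop := ∀ (n : Int), Dom_generate_all_operator_combinations n → Pre_generate_all_operator_combinations n → Spec_generate_all_operator_combinations n (generate_all_operator_combinations n)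

-- ===== LEMMAS AND PROOFS =====

-- A's append-loop is a flatMap.
theorem pv_foldl_app (xs : List (List String)) (acc : List (List String)) :
    xs.foldl (fun combinations operators =>
        (combinations ++ [operators ++ ["+"]]) ++ [operators ++ ["*"]]) acc
      = acc ++ pvProductStep xs := by
  induction xs generalizing acc with
  | nil => simp [pvProductStep]
  | cons x xs ih => simp [pvProductStep, List.flatMap]

theorem pv_A_step (n : Int) (h : 2 ≤ n) :
    generate_all_operator_combinations n
      = pvProductStep (generate_all_operator_combinations (n - 1)) := by
  rw [generate_all_operator_combinations]
  rw [if_neg (by omega)]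
  simpa using pv_foldl_app (generate_all_operator_combinations (n - 1)) []

theorem pv_B_step (n : Int) (h : 2 ≤ n) :
    generate_all_operator_combinations_alt n
      = pvProductStep (generate_all_operator_combinations_alt (n - 1)) := by
  have hk : (n - 1).toNat = (n - 2).toNat + 1 := by omega
  unfold generate_all_operator_combinations_alt
  rw [if_neg (by omega), hk, List.range_succ, List.foldl_append]
  by_cases h1 : n - 1 ≤ 1
  · have : (n - 2).toNat = 0 := by omega
    simp [this, h1]
  · rw [if_neg h1]
    have : n - 1 - 1 = n - 2 := by omega
    simp [this]

theorem pv_eq_nat (k : Nat) :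
    generate_all_operator_combinations ((k : Int) + 1)
      = generate_all_operator_combinations_alt ((k : Int) + 1) := by
  induction k with
  | zero =>
      rw [generate_all_operator_combinations]
      simp [generate_all_operator_combinations_alt]
  | succ k ih =>
      have hc : ((k + 1 : Nat) : Int) + 1 = (k : Int) + 1 + 1 := by push_cast; ring
      have h2 : (2 : Int) ≤ (k : Int) + 1 + 1 := by omega
      rw [hc, pv_A_step _ h2, pv_B_step _ h2]
      simp only [add_sub_cancel_right]
      rw [ih]

-- ===== VERDICT (by name: the statement is the Claim_ definition above) =====
theorem generate_all_operator_combinations_spec : Claim_equal_generate_all_operator_combinations := by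
  intro n _ _
  unfold Spec_generate_all_operator_combinations
  by_cases h : n ≤ 1
  · rw [generate_all_operator_combinations]
    simp [generate_all_operator_combinations_alt, h]
  · have hk : n = ((n - 1).toNat : Int) + 1 := by omega
    rw [hk]
    exact pv_eq_nat (n - 1).toNat
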